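-- pv_equiv track=rewrite | github.com/hexanna1/hex-study | pattern_enumeration.py | _max_pair_hex_span
-- ===== SOURCE A (Python) =====
-- from typing import Iterable
--
-- Point = tuple[int, int]
--
-- def _max_pair_hex_span(points: Iterable[Point]) -> int:
--     pts = tuple(points)
--     if len(pts) <= 1:
--         return 0
--     qs = [int(q) for q, _r in pts]
--     rs = [int(r) for _q, r in pts]
--     ss = [int(q) + int(r) for q, r in pts]
--     return int(max(max(qs) - min(qs), max(rs) - min(rs), max(ss) - min(ss)))
-- ===== SOURCE B (Python) =====
-- def _span(vals):
--     # span of a nonempty iterable: sort it and subtract the endpoints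
--     vals = sorted(vals)
--     return vals[-1] - vals[0]
--
-- def _max_pair_hex_span(points):
--     pts = tuple(points)
--     if len(pts) <= 1:
--         return 0
--     return int(max(_span(int(q) for q, _r in pts),
--                    _span(int(r) for _q, r in pts),
--                    _span(int(q) + int(r) for q, r in pts)))
-- ===== Notes on version B (the rewrite author's own statement) =====
-- stated objective: alternative
-- what changed: Each coordinate span is obtained by sorting the projected values and subtracting the sorted list's endpoints (order statistics via sort), instead of separate max() and min() scans over materialized lists.
import Mathlib
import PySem

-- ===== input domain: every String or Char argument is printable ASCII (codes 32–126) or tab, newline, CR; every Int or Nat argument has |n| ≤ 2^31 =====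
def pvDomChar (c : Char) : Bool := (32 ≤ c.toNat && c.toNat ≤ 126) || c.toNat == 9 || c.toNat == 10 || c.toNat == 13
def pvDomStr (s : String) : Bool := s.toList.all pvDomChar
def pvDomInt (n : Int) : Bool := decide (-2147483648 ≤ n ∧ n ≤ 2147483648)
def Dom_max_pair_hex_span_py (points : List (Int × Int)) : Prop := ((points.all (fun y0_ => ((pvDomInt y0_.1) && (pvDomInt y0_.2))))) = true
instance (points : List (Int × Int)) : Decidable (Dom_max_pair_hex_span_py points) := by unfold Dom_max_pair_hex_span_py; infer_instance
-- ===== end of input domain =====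

-- B computes each coordinate span by sorting the projected values and subtracting the
-- sorted list's endpoints, instead of A's separate max()/min() scans (objective: alternative).

-- ===== PORT A =====
def max_pair_hex_span_py (points : List (Int × Int)) : Int :=
  if points.length ≤ 1 then 0
  else
    let qs := points.map (fun p => p.1)
    let rs := points.map (fun p => p.2)
    let ss := points.map (fun p => p.1 + p.2)
    max ((PySem.List.max? qs (fun y => y)).getD 0 - (PySem.List.min? qs (fun y => y)).getD 0)
      (max ((PySem.List.max? rs (fun y => y)).getD 0 - (PySem.List.min? rs (fun y => y)).getD 0)
        ((PySem.List.max? ss (fun y => y)).getD 0 - (PySem.List.min? ss (fun y => y)).getD 0))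

-- ===== PORT B =====
-- _span: sort the values, subtract the endpoints; it is only ever applied to nonempty
-- lists, where vals[-1]/vals[0] are getLast/head (the `0` defaults are unreachable totalizers).
def hexSpanOf (vals : List Int) : Int :=
  (PySem.List.sorted vals (fun x => x) false).getLastD 0 -
    (PySem.List.sorted vals (fun x => x) false).headD 0

def max_pair_hex_span_py_alt (points : List (Int × Int)) : Int :=
  match points with
  | [] => 0
  | [_] => 0
  | pts =>
    max (hexSpanOf (pts.map (fun p => p.1)))
      (max (hexSpanOf (pts.map (fun p => p.2)))
        (hexSpanOf (pts.map (fun p => p.1 + p.2))))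

-- ===== PRECONDITION & SPEC =====
def Spec_max_pair_hex_span_py (points : List (Int × Int)) (out : Int) : Prop := out = max_pair_hex_span_py_alt points
instance (points : List (Int × Int)) (out : Int) : Decidable (Spec_max_pair_hex_span_py points out) := by unfold Spec_max_pair_hex_span_py; infer_instance

-- ===== CLAIM =====
def Claim_equal_max_pair_hex_span_py : Prop := ∀ (points : List (Int × Int)), Dom_max_pair_hex_span_py points → Spec_max_pair_hex_span_py points (max_pair_hex_span_py points)

-- ===== LEMMAS AND PROOFS =====

-- head of the sorted list is the running minimum
theorem sorted_headD_eq_foldl_min (x : Int) (t : List Int) :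
    (PySem.List.sorted (x :: t) (fun y => y) false).headD 0 = t.foldl min x := by
  have hne : PySem.List.sorted (x :: t) (fun y => y) false ≠ [] := by
    simp [PySem.List.sorted_eq_nil_iff]
  obtain ⟨m, ts, hs⟩ := List.exists_cons_of_ne_nil hne
  have hmin : PySem.List.min? (x :: t) (fun y => y) = some (t.foldl min x) :=
    PySem.List.min?_id_cons x t
  have hfm : t.foldl min x ∈ x :: t := PySem.List.min?_mem hmin
  have hfle : ∀ y ∈ x :: t, t.foldl min x ≤ y := PySem.List.min?_isMin hmin
  have hmle : ∀ y ∈ x :: t, m ≤ y := PySem.List.key_head_sorted_le (x :: t) (fun y => y) hs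
  have hmmem : m ∈ x :: t := by
    have : m ∈ PySem.List.sorted (x :: t) (fun y => y) false := by simp [hs]
    exact (PySem.List.mem_sorted _ _ _ _).mp this
  rw [hs]
  exact le_antisymm (hmle _ hfm) (hfle _ hmmem)

-- last of the sorted list is the running maximum
theorem sorted_getLastD_eq_foldl_max (x : Int) (t : List Int) :
    (PySem.List.sorted (x :: t) (fun y => y) false).getLastD 0 = t.foldl max x := by
  have hne : PySem.List.sorted (x :: t) (fun y => y) false ≠ [] := by
    simp [PySem.List.sorted_eq_nil_iff]
  set s := PySem.List.sorted (x :: t) (fun y => y) false with hsdef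
  have hlen : 0 < s.length := List.length_pos_iff.mpr hne
  have hlt : s.length - 1 < s.length := by omega
  have hlast : s.getLastD 0 = s[s.length - 1] := by
    rw [List.getLastD_eq_getLast?, List.getLast?_eq_getElem?, List.getElem?_eq_getElem hlt]
    rfl
  have hmax : PySem.List.max? (x :: t) (fun y => y) = some (t.foldl max x) :=
    PySem.List.max?_id_cons x t
  have hfm : t.foldl max x ∈ x :: t := PySem.List.max?_mem hmax
  have hfge : ∀ y ∈ x :: t, y ≤ t.foldl max x := PySem.List.max?_isMax hmax
  have hlmem : s[s.length - 1] ∈ x :: t := by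
    have : s[s.length - 1] ∈ s := List.getElem_mem _
    exact (PySem.List.mem_sorted _ _ _ _).mp this
  have hge : ∀ y ∈ x :: t, y ≤ s[s.length - 1] := by
    intro y hy
    have hys : y ∈ s := (PySem.List.mem_sorted _ _ _ _).mpr hy
    obtain ⟨p, hp, hyp⟩ := List.mem_iff_getElem.mp hys
    have hple : p ≤ s.length - 1 := by omega
    have hmono := PySem.List.sorted_id_getElem_mono (xs := x :: t)
      (p := p) (q := s.length - 1) hple (by rw [← hsdef]; exact hlt)
    calc y = s[p] := hyp.symm
      _ ≤ s[s.length - 1] := hmono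
  rw [hlast]
  exact le_antisymm (hfge _ hlmem) (hge _ hfm)

theorem hexSpanOf_cons (x : Int) (t : List Int) :
    hexSpanOf (x :: t) = t.foldl max x - t.foldl min x := by
  unfold hexSpanOf
  rw [sorted_getLastD_eq_foldl_max, sorted_headD_eq_foldl_min]

-- one projection: A's max-minus-min scan equals B's sorted-endpoints span
theorem proj_span_eq (f : (Int × Int) → Int) (p : Int × Int) (rest : List (Int × Int)) :
    (PySem.List.max? ((p :: rest).map f) (fun y => y)).getD 0
      - (PySem.List.min? ((p :: rest).map f) (fun y => y)).getD 0
      = hexSpanOf ((p :: rest).map f) := by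
  rw [List.map_cons, hexSpanOf_cons, PySem.List.max?_id_cons, PySem.List.min?_id_cons,
    List.foldl_map, List.foldl_map]
  rfl

-- ===== VERDICT =====
theorem max_pair_hex_span_py_spec : Claim_equal_max_pair_hex_span_py := by
  intro points _
  unfold Spec_max_pair_hex_span_py
  match points with
  | [] => rfl
  | [_] => rfl
  | p :: q :: rest =>
    show max_pair_hex_span_py (p :: q :: rest)
      = max (hexSpanOf ((p :: q :: rest).map (fun p => p.1)))
          (max (hexSpanOf ((p :: q :: rest).map (fun p => p.2)))
            (hexSpanOf ((p :: q :: rest).map (fun p => p.1 + p.2))))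
    unfold max_pair_hex_span_py
    rw [if_neg (by simp)]
    show max ((PySem.List.max? ((p :: q :: rest).map (fun p => p.1)) (fun y => y)).getD 0
          - (PySem.List.min? ((p :: q :: rest).map (fun p => p.1)) (fun y => y)).getD 0)
        (max ((PySem.List.max? ((p :: q :: rest).map (fun p => p.2)) (fun y => y)).getD 0
            - (PySem.List.min? ((p :: q :: rest).map (fun p => p.2)) (fun y => y)).getD 0)
          ((PySem.List.max? ((p :: q :: rest).map (fun p => p.1 + p.2)) (fun y => y)).getD 0
            - (PySem.List.min? ((p :: q :: rest).map (fun p => p.1 + p.2)) (fun y => y)).getD 0)) = _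
    rw [proj_span_eq (fun p => p.1), proj_span_eq (fun p => p.2),
      proj_span_eq (fun p => p.1 + p.2)]
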